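-- pv_equiv track=rewrite | github.com/dollarbillio/-DN-Learning_Algorithms | BitWise/main.py | trade_combo
-- ===== SOURCE A (Python) =====
-- def trade_combo(list_1):
-- 	'''Return a combo of possible buy and sell between currency
-- 	   the trade combo return an iterable by using yield
-- 	'''
-- 	N = len(list_1)
-- 	currency_dict = {}
-- 	for i in range(N):
-- 		currency_dict[i] = list_1[i]
--
-- 	for i in range(2**N):
-- 		Combo = []
-- 		for j in range(N):
-- 			if (i // 2**j) % 2 == 1:
-- 				Combo.append("- " + currency_dict[j])
-- 			else:
-- 				Combo.append("+ " + currency_dict[j])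
--
-- 		yield Combo
-- ===== SOURCE B (Python) =====
-- def trade_combo(list_1):
--     '''Return a combo of possible buy and sell between currency
--        (recursive generator over the list structure; element 0 toggles fastest)
--     '''
--     if not list_1:
--         yield []
--         return
--     first = list_1[0]
--     for c in trade_combo(list_1[1:]):
--         yield ["+ " + first] + c
--         yield ["- " + first] + c
-- ===== Notes on version B (the rewrite author's own statement) =====
-- stated objective: simpler
-- what changed: Replaced the dict build plus the bit-extraction double loop over range(2**N) x range(N) by a recursive generator over the list: combos of the tail are each prefixed with '+ head' then '- head', preserving the little-endian order.
import Mathlib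
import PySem

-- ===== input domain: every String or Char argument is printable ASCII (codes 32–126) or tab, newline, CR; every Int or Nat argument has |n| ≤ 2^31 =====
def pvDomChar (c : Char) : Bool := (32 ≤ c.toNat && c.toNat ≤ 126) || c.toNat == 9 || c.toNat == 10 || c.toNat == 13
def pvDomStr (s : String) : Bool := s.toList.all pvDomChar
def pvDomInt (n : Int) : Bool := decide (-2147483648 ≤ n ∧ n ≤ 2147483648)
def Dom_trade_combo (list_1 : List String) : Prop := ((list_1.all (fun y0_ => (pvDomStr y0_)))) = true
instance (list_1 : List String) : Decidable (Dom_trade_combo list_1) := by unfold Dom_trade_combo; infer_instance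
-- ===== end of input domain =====

-- B replaces A's dict build + bit-extraction double loop by a recursive generator over the
-- list structure (objective: simpler); both yield the same 2^N combos in the same order.

-- ===== PORT A =====
-- literal port of A: build currency_dict, then for each i in range(2**N) extract bits j
def trade_combo (list_1 : List String) : List (List String) :=
  let N : Int := (list_1.length : Int)
  let currency_dict : PySem.Dict Int String :=
    (PySem.List.pyRange 0 N).foldl
      (fun d i => d.insert i (PySem.List.pyGetD list_1 i "")) (PySem.Dict.empty : PySem.Dict Int String)
  (PySem.List.pyRange 0 ((2 : Int) ^ list_1.length)).foldl
    (fun acc i =>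
      let combo :=
        (PySem.List.pyRange 0 N).foldl
          (fun c j =>
            if PySem.Int.mod (PySem.Int.floordiv i ((2 : Int) ^ j.toNat)) 2 = 1 then
              c ++ ["- " ++ currency_dict.getD j ""]
            else
              c ++ ["+ " ++ currency_dict.getD j ""]) []
      acc ++ [combo]) []

-- ===== PORT B =====
-- recursive generator: for each combo of the tail, yield "+ head" then "- head" in front
def trade_combo_alt : List String → List (List String)
  | [] => [[]]
  | x :: rest =>
    (trade_combo_alt rest).flatMap (fun c => [("+ " ++ x) :: c, ("- " ++ x) :: c])

-- ===== PRECONDITION & SPEC =====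
def Spec_trade_combo (list_1 : List String) (out : List (List String)) : Prop := out = trade_combo_alt list_1
instance (list_1 : List String) (out : List (List String)) : Decidable (Spec_trade_combo list_1 out) := by unfold Spec_trade_combo; infer_instance

-- ===== CLAIM (what is proved, stated in full; the proofs are below) =====
def Claim_equal_trade_combo : Prop := ∀ (list_1 : List String), Dom_trade_combo list_1 → Spec_trade_combo list_1 (trade_combo list_1)

-- ===== LEMMAS AND PROOFS =====

-- the combo A builds for counter i, expressed by structural recursion (bit 0 = head)
def comboN : List String → Nat → List String
  | [], _ => []
  | x :: rest, i => ((if i % 2 = 1 then "- " else "+ ") ++ x) :: comboN rest (i / 2)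

theorem comboN_eq_map (l : List String) (k : Nat) :
    comboN l k
      = (List.range l.length).map
          (fun j => (if (k / 2 ^ j) % 2 = 1 then "- " else "+ ") ++ l.getD j "") := by
  induction l generalizing k with
  | nil => simp [comboN]
  | cons x rest ih =>
    simp only [comboN, List.length_cons, List.range_succ_eq_map, List.map_cons, List.map_map]
    congr 1
    · simp
    rw [ih (k / 2)]
    apply List.map_congr_left
    intro j _
    simp [Function.comp, pow_succ, Nat.div_div_eq_div_mul, Nat.mul_comm]

-- the dict A builds answers getD j "" = l.getD j "" for every j < l.length
theorem dict_getD (l : List String) (m : Nat) (hm : m ≤ l.length) (j : Nat) (hj : j < m) :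
    ((PySem.List.pyRange 0 (m : Int)).foldl
        (fun d i => d.insert i (PySem.List.pyGetD l i "")) (PySem.Dict.empty : PySem.Dict Int String)).getD (j : Int) ""
      = l.getD j "" := by
  induction m with
  | zero => omega
  | succ m ih =>
    have h1 : ((m : Int) + 1) = ((m + 1 : Nat) : Int) := by push_cast; ring
    rw [← h1, PySem.List.pyRange_one_succ_right (by positivity), List.foldl_append]
    simp only [List.foldl_cons, List.foldl_nil, PySem.Dict.getD_insert]
    by_cases h : j = m
    · subst h; simp [PySem.List.pyGetD_natCast]
    · rw [if_neg (by exact_mod_cast h), ih (by omega) (by omega)]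

-- appending one of two strings under a test is appending the if-packaged string
theorem foldl_ite_append {α β : Type} (p : α → Prop) [DecidablePred p] (f g : α → β)
    (l : List α) (acc : List β) :
    l.foldl (fun c x => if p x then c ++ [f x] else c ++ [g x]) acc
      = acc ++ l.map (fun x => if p x then f x else g x) := by
  rw [← PySem.List.foldl_append_singleton_eq_map (f := fun x => if p x then f x else g x)]
  apply PySem.List.foldl_congr_mem
  intro c x _
  split_ifs <;> rfl

-- A's result is the map of comboN over range(2^N)
theorem trade_combo_eq_map (l : List String) :
    trade_combo l = (List.range (2 ^ l.length)).map (comboN l) := by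
  unfold trade_combo
  simp only [PySem.List.foldl_append_singleton_eq_map, List.nil_append]
  have h2 : ((2 : Int) ^ l.length) = ((2 ^ l.length : Nat) : Int) := by push_cast; ring
  rw [h2]
  simp only [PySem.List.pyRange_zero_natCast, List.map_map]
  apply List.map_congr_left
  intro k _
  simp only [Function.comp]
  rw [foldl_ite_append, List.nil_append, List.map_map, comboN_eq_map]
  apply List.map_congr_left
  intro j hj
  have hjl : j < l.length := List.mem_range.mp hj
  have hd := dict_getD l l.length le_rfl j hjl
  rw [PySem.List.pyRange_zero_natCast] at hd
  simp only [Function.comp, Int.toNat_natCast]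
  have hp : ((2 : Int) ^ j) = ((2 ^ j : Nat) : Int) := by push_cast; ring
  rw [hp, PySem.Int.floordiv_natCast]
  have hm : ((2 : Int)) = ((2 : Nat) : Int) := by norm_num
  rw [hm, PySem.Int.mod_natCast, hd]
  by_cases hb : (k / 2 ^ j) % 2 = 1
  · rw [if_pos (by exact_mod_cast hb), if_pos hb]
  · rw [if_neg (by exact_mod_cast hb), if_neg hb]

-- interleaving: mapping over range(2*M) is flatMapping pairs (2q, 2q+1) over range(M)
theorem map_range_two_mul {α : Type} (M : Nat) (g : Nat → α) :
    (List.range (2 * M)).map g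
      = (List.range M).flatMap (fun q => [g (2 * q), g (2 * q + 1)]) := by
  induction M with
  | zero => simp
  | succ M ih =>
    have h : 2 * (M + 1) = (2 * M + 1) + 1 := by ring
    rw [h, List.range_succ, List.range_succ, List.range_succ, List.map_append,
      List.map_append, List.flatMap_append, ih]
    simp [List.flatMap_cons]

-- B's result is the same map of comboN over range(2^N)
theorem trade_combo_alt_eq_map (l : List String) :
    trade_combo_alt l = (List.range (2 ^ l.length)).map (comboN l) := by
  induction l with
  | nil => simp [trade_combo_alt, comboN]
  | cons x rest ih =>
    rw [trade_combo_alt, ih, List.flatMap_map]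
    have h : 2 ^ (x :: rest).length = 2 * 2 ^ rest.length := by
      simp [List.length_cons, pow_succ, Nat.mul_comm]
    rw [h, map_range_two_mul]
    refine List.flatMap_congr fun q _ => ?_
    have e1 : comboN (x :: rest) (2 * q) = ("+ " ++ x) :: comboN rest q := by
      simp [comboN, Nat.mul_mod_right]
    have e2 : comboN (x :: rest) (2 * q + 1) = ("- " ++ x) :: comboN rest q := by
      have : (2 * q + 1) / 2 = q := by omega
      simp [comboN, this]
    rw [e1, e2]

-- ===== VERDICT (by name: the statement is the Claim_ definition above) =====
theorem trade_combo_spec : Claim_equal_trade_combo := by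
  intro l _
  unfold Spec_trade_combo
  rw [trade_combo_eq_map, trade_combo_alt_eq_map]
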